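-- pv_equiv track=rewrite | github.com/marcofuentes05/regex-AFs | flaskr/utils/p1.py | remove_cerr_pos
-- ===== SOURCE A (Python) =====
-- def remove_cerr_pos(r):
--     for c in range(0, len(r), 1):
--         if r[c] == "+":
--             subr = r[:c]
--             postr = r[c+1:]
--             contador = 0
--             subs = ""
--             i = len(subr) - 1
--             while(i >= 0):
--                 if r[i] == ")":
--                     contador += 1
--                     if contador == 1:
--                         i -= 1
--                     else:
--                         subs = r[i] +subs
--                         i-=1
--
--                 elif r[i] =="(":
--                     contador -= 1
--                     if contador == 0 :
--                         i=-1
--                     else: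
--                         subs = r[i] + subs
--                         i-=1
--                 else:
--                     if contador != 0:
--                         subs = r[i] +subs
--                         i-=1
--                     else:
--                         subs = r[i]
--                         i=-1
--             if len(subs) == 1:
--                 return subr+"*"+subs+postr
--             else:
--                 return subr+"*("+subs+")"+postr
-- ===== SOURCE B (Python) =====
-- def remove_cerr_pos(r):
--     c = r.find('+')
--     if c == -1:
--         return None
--     prefix, rest = r[:c], r[c + 1:]
--     if not prefix or prefix[-1] != ')':
--         inner = prefix[-1:]
--     else:
--         # forward pass over prefix[:-1] with a stack of segments:
--         # the top segment is always the text after the last unmatched '('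
--         segs = ['']
--         for ch in prefix[:-1]:
--             if ch == '(':
--                 segs.append('')
--             elif ch == ')' and len(segs) > 1:
--                 closed = segs.pop()
--                 segs[-1] += '(' + closed + ')'
--             else:
--                 segs[-1] += ch
--         inner = segs[-1]
--     body = '*' + inner if len(inner) == 1 else '*(' + inner + ')'
--     return prefix + body + rest
-- ===== Notes on version B (the rewrite author's own statement) =====
-- stated objective: faster
-- what changed: Replaces A's indexed for-loop plus backward counter-driven while-scan (which rebuilds the operand by per-character string prepends, quadratic in the operand) by str.find for the first '+' and a single forward pass over the prefix with a stack of text segments whose top is always the text after the last unmatched '(', built by amortized appends.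
-- outside the precondition, e.g. on remove_cerr_pos('a(+'): A returns 'a(*(a()', B returns 'a(*('
import Mathlib
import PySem

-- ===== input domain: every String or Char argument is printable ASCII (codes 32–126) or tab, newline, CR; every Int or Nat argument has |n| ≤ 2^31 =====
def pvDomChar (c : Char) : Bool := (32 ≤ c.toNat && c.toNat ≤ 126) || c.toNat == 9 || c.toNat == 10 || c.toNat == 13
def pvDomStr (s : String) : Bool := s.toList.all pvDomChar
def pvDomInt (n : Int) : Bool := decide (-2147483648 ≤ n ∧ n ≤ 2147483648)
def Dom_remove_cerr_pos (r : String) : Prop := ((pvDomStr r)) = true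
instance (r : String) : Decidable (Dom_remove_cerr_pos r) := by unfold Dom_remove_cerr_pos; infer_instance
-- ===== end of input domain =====

-- B replaces A's indexed for-loop and backward counter while-scan (per-char string
-- prepends) by str.find plus one forward segment-stack pass over the prefix
-- (measured faster in a timing run).


-- ===== PORT A =====
-- A's inner while-loop, verbatim: first Nat argument is i+1 (0 encodes i = -1, i.e. loop
-- exit); `i := -1` followed by loop exit is `return subs`/`return [ch]`. Every executed
-- index is in range, so `getD`'s default ' ' is never read (A indexes r[i] directly).
def pvAWhile (s : List Char) : Nat → Int → List Char → List Char
  | 0, _, subs => subs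
  | i + 1, contador, subs =>
    let ch := s.getD i ' '
    if ch = ')' then
      if contador + 1 = 1 then pvAWhile s i (contador + 1) subs
      else pvAWhile s i (contador + 1) (ch :: subs)
    else if ch = '(' then
      if contador - 1 = 0 then subs
      else pvAWhile s i (contador - 1) (ch :: subs)
    else
      if contador ≠ 0 then pvAWhile s i contador (ch :: subs)
      else [ch]

-- the body executed by A when r[c] == '+'
def pvABody (l : List Char) (c : Nat) : List Char :=
  let subr := PySem.List.slice l none (some (c : Int))             -- r[:c]
  let postr := PySem.List.slice l (some ((c : Int) + 1)) none      -- r[c+1:]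
  let subs := pvAWhile l subr.length 0 []                          -- i starts at len(subr)-1
  if subs.length = 1 then subr ++ '*' :: (subs ++ postr)
  else subr ++ '*' :: '(' :: (subs ++ ')' :: postr)

-- `for c in range(0, len(r), 1): if r[c] == '+': return …`; falls off the end → None
def pvAFor (l : List Char) : List Char → Nat → Option (List Char)
  | [], _ => none
  | ch :: t, c => if ch = '+' then some (pvABody l c) else pvAFor l t (c + 1)

def remove_cerr_pos (r : String) : Option String :=
  (pvAFor r.toList r.toList 0).map String.ofList

-- ===== PORT B =====
-- Source B's forward for-loop over prefix[:-1]: `top` is segs[-1], `st` the rest of the stack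
-- (segs[0] last).  '(' pushes a fresh segment, ')' with a non-trivial stack pops and glues
-- '(' + closed + ')' onto the new top, anything else is appended to the top.
def pvBScan : List Char → List Char → List (List Char) → List Char × List (List Char)
  | [], top, st => (top, st)
  | ch :: cs, top, st =>
    if ch = '(' then pvBScan cs [] (top :: st)
    else if ch = ')' then
      match st with
      | b :: rs => pvBScan cs (b ++ '(' :: (top ++ [')'])) rs
      | [] => pvBScan cs (top ++ [')']) []
    else pvBScan cs (top ++ [ch]) st

def pvBInner (pre : List Char) : List Char :=
  if pre.length = 0 ∨ PySem.List.pyGet? pre (-1) ≠ some ')' then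
    PySem.List.slice pre (some (-1)) none                          -- prefix[-1:]
  else
    (pvBScan (PySem.List.slice pre none (some (-1))) [] []).1      -- scan prefix[:-1]

def remove_cerr_pos_alt (r : String) : Option String :=
  let l := r.toList
  let c := PySem.Chars.find l ['+']                                -- r.find('+')
  if c = -1 then none
  else
    let pre := PySem.List.slice l none (some c)                    -- r[:c]
    let rest := PySem.List.slice l (some (c + 1)) none             -- r[c+1:]
    let inner := pvBInner pre
    let body := if inner.length = 1 then '*' :: inner else '*' :: '(' :: (inner ++ [')'])
    some (String.ofList (pre ++ body ++ rest))

-- ===== PRECONDITION & SPEC =====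
-- Pre_ excludes inputs whose first '+' immediately follows '(' — a malformed pattern in
-- which '+' has no operand: there A's value is an accident of the backward loop running
-- with a negative counter (both values are artefacts, neither is specified).
def Pre_remove_cerr_pos (r : String) : Prop :=
  0 < PySem.Chars.find r.toList ['+'] →
    PySem.List.pyGet? r.toList (PySem.Chars.find r.toList ['+'] - 1) ≠ some '('
instance (r : String) : Decidable (Pre_remove_cerr_pos r) := by
  unfold Pre_remove_cerr_pos; infer_instance
def pvWitness_remove_cerr_pos : String := "(ab)+c"
def Spec_remove_cerr_pos (r : String) (out : Option String) : Prop := out = remove_cerr_pos_alt r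
instance (r : String) (out : Option String) : Decidable (Spec_remove_cerr_pos r out) := by unfold Spec_remove_cerr_pos; infer_instance

-- ===== CLAIM (what is proved, stated in full; the proofs are below) =====
def Claim_equal_remove_cerr_pos : Prop := ∀ (r : String), Dom_remove_cerr_pos r → Pre_remove_cerr_pos r → Spec_remove_cerr_pos r (remove_cerr_pos r)

-- ===== LEMMAS AND PROOFS =====

-- A's while-loop, re-expressed as a structural scan over the reversed processed prefix.
def pvAScan : List Char → Int → List Char → List Char
  | [], _, subs => subs
  | ch :: t, k, subs =>
    if ch = ')' then
      if k + 1 = 1 then pvAScan t (k + 1) subs else pvAScan t (k + 1) (ch :: subs)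
    else if ch = '(' then
      if k - 1 = 0 then subs else pvAScan t (k - 1) (ch :: subs)
    else
      if k ≠ 0 then pvAScan t k (ch :: subs) else [ch]

theorem pvAWhile_eq_scan (l : List Char) :
    ∀ (i : Nat), i ≤ l.length → ∀ (k : Int) (subs : List Char),
      pvAWhile l i k subs = pvAScan ((l.take i).reverse) k subs := by
  intro i
  induction i with
  | zero => intro _ k subs; simp [pvAWhile, pvAScan]
  | succ i ih =>
    intro hle k subs
    have hlt : i < l.length := by omega
    rw [List.take_add_one, List.getElem?_eq_getElem hlt]
    simp only [Option.toList_some, List.reverse_append, List.reverse_cons,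
      List.reverse_nil, List.nil_append, List.singleton_append]
    simp only [pvAWhile, pvAScan, List.getD_eq_getElem l ' ' hlt]
    split_ifs <;> first | rfl | exact ih (by omega) _ _

-- a segment through which the backward scan passes keeping the counter (≥ 1) unchanged
def pvNeutral (v : List Char) : Prop :=
  ∀ (k : Int), 1 ≤ k → ∀ (t subs : List Char),
    pvAScan (v.reverse ++ t) k subs = pvAScan t k (v ++ subs)

-- a segment through which the backward scan passes, possibly raising the counter
def pvBot (v : List Char) : Prop :=
  ∀ (k : Int), 1 ≤ k → ∀ (t subs : List Char),
    ∃ k', 1 ≤ k' ∧ pvAScan (v.reverse ++ t) k subs = pvAScan t k' (v ++ subs)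

theorem pvNeutral_nil : pvNeutral [] := by
  intro k _ t subs; simp

theorem pvNeutral_append {v w : List Char} (hv : pvNeutral v) (hw : pvNeutral w) :
    pvNeutral (v ++ w) := by
  intro k hk t subs
  simp only [List.reverse_append, List.append_assoc]
  rw [hw k hk, hv k hk]

theorem pvNeutral_char {ch : Char} (h1 : ch ≠ ')') (h2 : ch ≠ '(') : pvNeutral [ch] := by
  intro k hk t subs
  simp only [List.reverse_cons, List.reverse_nil, List.nil_append, List.singleton_append,
    pvAScan]
  rw [if_neg h1, if_neg h2, if_pos (by omega : k ≠ 0)]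

theorem pvNeutral_block {v : List Char} (hv : pvNeutral v) :
    pvNeutral ('(' :: (v ++ [')'])) := by
  intro k hk t subs
  have h1 : ¬ k + 1 = 1 := by omega
  have h3 : k + 1 - 1 = k := by omega
  have h4 : ¬ k = 0 := by omega
  simp only [List.reverse_cons, List.reverse_append, List.reverse_nil, List.nil_append,
    List.append_assoc, List.cons_append]
  show pvAScan (')' :: (v.reverse ++ ('(' :: t))) k subs = _
  simp only [pvAScan, h1, if_false, if_true, Char.reduceEq]
  rw [hv (k + 1) (by omega)]
  simp only [pvAScan, h3, h4, if_false, if_true, Char.reduceEq]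
theorem pvBot_of_neutral {v : List Char} (hv : pvNeutral v) : pvBot v := by
  intro k hk t subs; exact ⟨k, hk, hv k hk t subs⟩

theorem pvBot_append {v w : List Char} (hv : pvBot v) (hw : pvBot w) : pvBot (v ++ w) := by
  intro k hk t subs
  obtain ⟨k1, hk1, h1⟩ := hw k hk (v.reverse ++ t) subs
  obtain ⟨k2, hk2, h2⟩ := hv k1 hk1 t (w ++ subs)
  refine ⟨k2, hk2, ?_⟩
  simp only [List.reverse_append, List.append_assoc]
  rw [h1, h2]

theorem pvBot_rparen : pvBot [')'] := by
  intro k hk t subs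
  refine ⟨k + 1, by omega, ?_⟩
  have h1 : ¬ k + 1 = 1 := by omega
  simp only [List.reverse_cons, List.reverse_nil, List.nil_append, List.singleton_append,
    pvAScan, h1, if_false, if_true, Char.reduceEq]
-- invariant of B's stack: every segment above the bottom is neutral, the bottom may
-- contain stray ')' (pvBot)
def pvSegsOK : List Char → List (List Char) → Prop
  | top, [] => pvBot top
  | top, b :: rs => pvNeutral top ∧ pvSegsOK b rs

-- the input text represented by a stack state
def pvFlat (top : List Char) (st : List (List Char)) : List Char :=
  st.foldl (fun acc s => s ++ '(' :: acc) top

def pvFlatRev : List (List Char) → List Char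
  | [] => []
  | b :: rs => '(' :: (b.reverse ++ pvFlatRev rs)

theorem pvFlat_append : ∀ (st : List (List Char)) (top x : List Char),
    pvFlat (top ++ x) st = pvFlat top st ++ x := by
  intro st
  induction st with
  | nil => intro top x; rfl
  | cons b rs ih =>
    intro top x
    show pvFlat (b ++ '(' :: (top ++ x)) rs = pvFlat (b ++ '(' :: top) rs ++ x
    rw [show b ++ '(' :: (top ++ x) = (b ++ '(' :: top) ++ x by simp]
    exact ih _ _

theorem pvFlat_reverse : ∀ (st : List (List Char)) (top : List Char),
    (pvFlat top st).reverse = top.reverse ++ pvFlatRev st := by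
  intro st
  induction st with
  | nil => intro top; simp [pvFlat, pvFlatRev]
  | cons b rs ih =>
    intro top
    show (pvFlat (b ++ '(' :: top) rs).reverse = _
    rw [ih]
    simp [pvFlatRev]

theorem pvBScan_inv : ∀ (cs top : List Char) (st : List (List Char)), pvSegsOK top st →
    pvSegsOK (pvBScan cs top st).1 (pvBScan cs top st).2 ∧
      pvFlat (pvBScan cs top st).1 (pvBScan cs top st).2 = pvFlat top st ++ cs := by
  intro cs
  induction cs with
  | nil => intro top st h; exact ⟨h, by simp [pvBScan]⟩
  | cons ch cs ih =>
    intro top st h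
    by_cases hlp : ch = '('
    · subst hlp
      simp only [pvBScan, Char.reduceEq, if_true, if_false]
      obtain ⟨h1, h2⟩ := ih [] (top :: st) ⟨pvNeutral_nil, h⟩
      refine ⟨h1, ?_⟩
      rw [h2]
      show pvFlat (top ++ ['(']) st ++ _ = _
      rw [pvFlat_append]
      simp
    · by_cases hrp : ch = ')'
      · subst hrp
        cases st with
        | nil =>
          simp only [pvBScan, Char.reduceEq, if_true, if_false]
          obtain ⟨h1, h2⟩ := ih (top ++ [')']) [] (pvBot_append h pvBot_rparen)
          refine ⟨h1, ?_⟩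
          rw [h2]
          show (top ++ [')']) ++ cs = top ++ ')' :: cs
          simp
        | cons b rs =>
          obtain ⟨hN, hbs⟩ := h
          simp only [pvBScan, Char.reduceEq, if_true, if_false]
          have hok : pvSegsOK (b ++ '(' :: (top ++ [')'])) rs := by
            cases rs with
            | nil => exact pvBot_append hbs (pvBot_of_neutral (pvNeutral_block hN))
            | cons x xs => exact ⟨pvNeutral_append hbs.1 (pvNeutral_block hN), hbs.2⟩
          obtain ⟨h1, h2⟩ := ih _ _ hok
          refine ⟨h1, ?_⟩
          rw [h2]
          rw [show b ++ '(' :: (top ++ [')']) = (b ++ '(' :: top) ++ [')'] by simp]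
          rw [pvFlat_append]
          show pvFlat top (b :: rs) ++ [')'] ++ cs = _
          simp
      · simp only [pvBScan, if_neg hlp, if_neg hrp]
        have hok : pvSegsOK (top ++ [ch]) st := by
          cases st with
          | nil => exact pvBot_append h (pvBot_of_neutral (pvNeutral_char hrp hlp))
          | cons b rs => exact ⟨pvNeutral_append h.1 (pvNeutral_char hrp hlp), h.2⟩
        obtain ⟨h1, h2⟩ := ih _ _ hok
        refine ⟨h1, ?_⟩
        rw [h2, pvFlat_append]
        simp

theorem pvFinal : ∀ (top : List Char) (st : List (List Char)), pvSegsOK top st →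
    pvAScan (pvFlat top st).reverse 1 [] = top := by
  intro top st h
  cases st with
  | nil =>
    obtain ⟨k', _, heq⟩ := h 1 (by omega) [] []
    show pvAScan (pvFlat top []).reverse 1 [] = top
    have hf : pvFlat top [] = top := rfl
    rw [hf]
    simpa [pvAScan] using heq
  | cons b rs =>
    rw [pvFlat_reverse]
    show pvAScan (top.reverse ++ pvFlatRev (b :: rs)) 1 [] = top
    have h1 := h.1 1 (by omega) (pvFlatRev (b :: rs)) []
    rw [h1]
    show pvAScan ('(' :: (b.reverse ++ pvFlatRev rs)) 1 (top ++ []) = top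
    simp [pvAScan]
theorem pvScan_eq_B (u : List Char) : pvAScan u.reverse 1 [] = (pvBScan u [] []).1 := by
  obtain ⟨h1, h2⟩ := pvBScan_inv u [] [] (pvBot_of_neutral pvNeutral_nil)
  have hfin := pvFinal _ _ h1
  rw [h2] at hfin
  simpa [pvFlat] using hfin

-- A's whole while-loop = B's inner, for prefixes not ending in '('
theorem pvDispatch (pre : List Char) (h : pre.getLast? ≠ some '(') :
    pvAScan pre.reverse 0 [] = pvBInner pre := by
  rcases List.eq_nil_or_concat' pre with rfl | ⟨u, a, rfl⟩
  · simp [pvAScan, pvBInner, PySem.List.slice]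
  · have ha : a ≠ '(' := by
      intro hEq; exact h (by simp [hEq])
    have hget : PySem.List.pyGet? (u ++ [a]) (-1) = some a := by
      simp [PySem.List.pyGet?, PySem.List.pyIdx?]
    simp only [List.reverse_append, List.reverse_cons, List.reverse_nil, List.nil_append,
      List.singleton_append]
    by_cases hr : a = ')'
    · subst hr
      show pvAScan (')' :: u.reverse) 0 [] = _
      have hstep : pvAScan (')' :: u.reverse) 0 [] = pvAScan u.reverse 1 [] := by
        simp [pvAScan]
      rw [hstep]
      unfold pvBInner
      rw [if_neg (by simp [hget])]
      rw [PySem.List.slice_to_neg_one, List.dropLast_concat]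
      exact pvScan_eq_B u
    · show pvAScan (a :: u.reverse) 0 [] = _
      have hstep : pvAScan (a :: u.reverse) 0 [] = [a] := by
        simp [pvAScan, hr, ha]
      rw [hstep]
      unfold pvBInner
      rw [if_pos (Or.inr (by simp [hget, hr]))]
      rw [PySem.List.slice_from_neg_one]
      simp
theorem pvAFor_found (l : List Char) : ∀ (t : List Char) (c j : Nat),
    t[j]? = some '+' → (∀ i, i < j → t[i]? ≠ some '+') →
    pvAFor l t c = some (pvABody l (c + j)) := by
  intro t
  induction t with
  | nil => intro c j h1 _; simp at h1
  | cons ch t' ih =>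
    intro c j h1 h3
    cases j with
    | zero =>
      have hch : ch = '+' := by simpa using h1
      simp [pvAFor, hch]
    | succ j' =>
      have hch : ch ≠ '+' := by
        have := h3 0 (Nat.succ_pos _)
        simpa using this
      simp only [pvAFor, if_neg hch]
      rw [ih (c + 1) j' (by simpa using h1)
        (fun i hi => by simpa using h3 (i + 1) (by omega))]
      rw [show c + 1 + j' = c + (j' + 1) by omega]

theorem pvAFor_none (l : List Char) : ∀ (t : List Char) (c : Nat), '+' ∉ t →
    pvAFor l t c = none := by
  intro t
  induction t with
  | nil => intro _ _; rfl
  | cons ch t' ih =>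
    intro c hmem
    have h1 : ch ≠ '+' := fun hEq => hmem (by simp [hEq])
    simp only [pvAFor, if_neg h1]
    exact ih _ (fun hm => hmem (List.mem_cons_of_mem _ hm))

theorem pvSinglePrefix {a : Char} {xs : List Char} : [a] <+: xs ↔ xs.head? = some a := by
  constructor
  · rintro ⟨t, rfl⟩; rfl
  · intro h
    cases xs with
    | nil => simp at h
    | cons x t =>
      have : x = a := by simpa using h
      exact ⟨t, by simp [this]⟩

-- ===== VERDICT (by name: the statement is the Claim_ definition above) =====
theorem remove_cerr_pos_spec : Claim_equal_remove_cerr_pos := by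
  intro r _ hpre
  unfold Spec_remove_cerr_pos remove_cerr_pos remove_cerr_pos_alt
  by_cases hc : PySem.Chars.find r.toList ['+'] = -1
  · rw [if_pos hc]
    have hmem : '+' ∉ r.toList := by
      intro hm
      obtain ⟨i, hi, hgi⟩ := List.getElem_of_mem hm
      have hinf : ['+'] <:+: r.toList :=
        ((pvSinglePrefix.mpr (by rw [List.head?_drop, List.getElem?_eq_getElem hi, hgi])).isInfix).trans
          (List.drop_suffix i r.toList).isInfix
      exact ((PySem.Chars.find_eq_neg_one_iff _ _).mp hc) hinf
    rw [pvAFor_none r.toList r.toList 0 hmem]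
    rfl
  · have hge : 0 ≤ PySem.Chars.find r.toList ['+'] := by
      have := PySem.Chars.neg_one_le_find r.toList ['+']
      omega
    obtain ⟨hpf, hmin⟩ := PySem.Chars.find_spec hge
    set cn : Nat := (PySem.Chars.find r.toList ['+']).toNat with hcn
    have hcast : PySem.Chars.find r.toList ['+'] = (cn : Int) := (Int.toNat_of_nonneg hge).symm
    have hchar : r.toList[cn]? = some '+' := by
      rw [← List.head?_drop]
      exact (pvSinglePrefix.mp hpf)
    have hclen : cn < r.toList.length := by
      rcases List.getElem?_eq_some_iff.mp hchar with ⟨h, _⟩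
      exact h
    have hnone : ∀ i, i < cn → r.toList[i]? ≠ some '+' := by
      intro i hi hcon
      exact hmin i hi (pvSinglePrefix.mpr (by rw [List.head?_drop]; exact hcon))
    rw [pvAFor_found r.toList r.toList 0 cn hchar hnone, if_neg hc]
    simp only [Option.map_some]
    -- both sides are `some (String.ofList …)`; reduce to list equality
    have hlen : (r.toList.take cn).length = cn := by
      rw [List.length_take]
      omega
    simp only [pvABody, Nat.zero_add]
    rw [hcast]
    rw [PySem.List.slice_to_natCast]
    rw [show ((cn : Int) + 1) = ((cn + 1 : Nat) : Int) by push_cast; ring]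
    rw [PySem.List.slice_from_natCast]
    rw [hlen]
    have hsubs : pvAWhile r.toList cn 0 [] = pvBInner (r.toList.take cn) := by
      rw [pvAWhile_eq_scan r.toList cn (le_of_lt hclen)]
      apply pvDispatch
      -- the char before the first '+', if any, is not '(' (Pre_)
      cases Nat.eq_zero_or_pos cn with
      | inl h0 => rw [h0]; simp
      | inr h0 =>
        have hpre' := hpre (by omega)
        rw [hcast] at hpre'
        intro hlast
        apply hpre'
        have hlast' : (r.toList.take cn)[cn - 1]? = some '(' := by
          rw [List.getLast?_eq_getElem?, hlen] at hlast
          exact hlast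
        have hidx : r.toList[cn - 1]? = some '(' := by
          rw [List.getElem?_take_of_lt (by omega)] at hlast'
          exact hlast'
        rw [PySem.List.pyGet?_eq_some_getElem r.toList (by omega) (by omega)]
        have ht : ((cn : Int) - 1).toNat = cn - 1 := by omega
        have hsome : r.toList[((cn : Int) - 1).toNat]? = some '(' := by
          rw [ht]; exact hidx
        rwa [List.getElem?_eq_getElem (by omega)] at hsome
    rw [hsubs]
    by_cases h1 : (pvBInner (r.toList.take cn)).length = 1
    · rw [if_pos h1, if_pos h1]
      congr 1
      apply congrArg
      simp
    · rw [if_neg h1, if_neg h1]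
      congr 1
      apply congrArg
      simp
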